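-- pv_equiv track=rewrite | github.com/drAfflatus/python_tests | tests/tasks.py | solve
-- ===== SOURCE A (Python) =====
-- def solve(phrases: list):
--     result = []  # список палиндромов
--     for phrase in phrases:  # пройpдите циклом по всем фразам
--         phrase_save = phrase.replace(" ", "")  # сохраните фразу без пробелов
--         inverse_phrase = phrase_save[::-1]  # сохраните фразу в обратном порядке
--         if phrase_save == inverse_phrase:  # сравните фразу с ней же, развернутой наоборот (через [::-1])
--             result.append(phrase)
--     return result
-- ===== SOURCE B (Python) =====
-- def solve(phrases: list):
--     result = []
--     for phrase in phrases:
--         s = phrase.replace(" ", "")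
--         i, j = 0, len(s) - 1
--         ok = True
--         while i < j:
--             if s[i] != s[j]:
--                 ok = False
--                 break
--             i += 1
--             j -= 1
--         if ok:
--             result.append(phrase)
--     return result
-- ===== Notes on version B (the rewrite author's own statement) =====
-- stated objective: alternative
-- what changed: Palindrome test done with inward-walking two-pointer indices and early exit on the first mismatch, instead of building a reversed copy and comparing whole strings.
import Mathlib
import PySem

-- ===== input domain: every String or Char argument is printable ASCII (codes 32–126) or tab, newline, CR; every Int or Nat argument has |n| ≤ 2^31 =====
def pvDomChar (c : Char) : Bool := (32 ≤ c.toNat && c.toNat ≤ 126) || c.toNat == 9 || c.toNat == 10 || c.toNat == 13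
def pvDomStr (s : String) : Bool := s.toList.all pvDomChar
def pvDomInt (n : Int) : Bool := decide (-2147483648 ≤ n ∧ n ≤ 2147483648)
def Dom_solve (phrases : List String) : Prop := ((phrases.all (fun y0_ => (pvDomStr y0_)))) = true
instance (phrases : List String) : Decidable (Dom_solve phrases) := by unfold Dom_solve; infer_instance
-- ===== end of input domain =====

-- B replaces A's "compare with a reversed copy" palindrome test by an inward-walking
-- two-pointer loop with early exit (objective: alternative; same asymptotic cost).

-- ===== PORT A =====
-- literal port of A: strip spaces, build the reversed copy with [::-1], compare, append the original
def solve (phrases : List String) : List String :=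
  phrases.foldl
    (fun result phrase =>
      let phrase_save := PySem.Str.replace phrase " " ""
      -- phrase_save[::-1]: full slice with step -1; never raises, so getD is exact
      let inverse_phrase := (PySem.Str.slice? phrase_save none none (-1)).getD ""
      if phrase_save == inverse_phrase then result ++ [phrase] else result)
    []

-- ===== PORT B =====
-- the while-loop of Source B: i walks up, j walks down, stop at first mismatch.
-- s[i]/s[j] in Source B are always in range (0 ≤ i < j < len s), so getD is exact there.
def twoPtr (s : List Char) (i j : Nat) : Bool :=
  if i < j then
    if s.getD i ' ' != s.getD j ' ' then false
    else twoPtr s (i + 1) (j - 1)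
  else true
termination_by j - i
decreasing_by omega

def solve_alt (phrases : List String) : List String :=
  phrases.foldl
    (fun result phrase =>
      let s := (PySem.Str.replace phrase " " "").toList
      if twoPtr s 0 (s.length - 1) then result ++ [phrase] else result)
    []

-- ===== PRECONDITION & SPEC =====
def Spec_solve (phrases : List String) (out : List String) : Prop := out = solve_alt phrases
instance (phrases : List String) (out : List String) : Decidable (Spec_solve phrases out) := by unfold Spec_solve; infer_instance

-- ===== CLAIM (what is proved, stated in full; the proofs are below) =====
def Claim_equal_solve : Prop := ∀ (phrases : List String), Dom_solve phrases → Spec_solve phrases (solve phrases)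

-- ===== LEMMAS AND PROOFS =====

-- characterisation of the two-pointer loop: true iff every pair (k, i+j-k) strictly inside [i, j] matches
theorem twoPtr_iff (s : List Char) (d i j : Nat) (hd : j - i ≤ d) :
    twoPtr s i j = true ↔ ∀ k, i ≤ k → k < j → s.getD k ' ' = s.getD (i + j - k) ' ' := by
  induction d generalizing i j with
  | zero =>
    rw [twoPtr]
    have hij : ¬ i < j := by omega
    simp only [if_neg hij, true_iff]
    intro k hk1 hk2; omega
  | succ d ih =>
    rw [twoPtr]
    by_cases hij : i < j
    · simp only [if_pos hij]
      by_cases hne : s.getD i ' ' = s.getD j ' '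
      · rw [bne_eq_false_iff_eq.mpr hne]
        simp only [Bool.false_eq_true, if_false]
        rw [ih (i + 1) (j - 1) (by omega)]
        constructor
        · intro h k hk1 hk2
          rcases Nat.lt_or_ge k (i + 1) with hk | hk
          · have hki : k = i := by omega
            rw [hki]
            have he : i + j - i = j := by omega
            rw [he]; exact hne
          · rcases Nat.lt_or_ge k (j - 1) with hk' | hk'
            · have := h k hk (by omega)
              have he : i + 1 + (j - 1) - k = i + j - k := by omega
              rwa [he] at this
            · -- k = j - 1; use symmetry via the pair i+1
              have hkj : k = j - 1 := by omega
              subst hkj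
              have he : i + j - (j - 1) = i + 1 := by omega
              rw [he]
              rcases Nat.lt_or_ge (i + 1) (j - 1) with hlt | hge
              · have := h (i + 1) (by omega) hlt
                have he2 : i + 1 + (j - 1) - (i + 1) = j - 1 := by omega
                rw [he2] at this
                exact this.symm
              · have : j - 1 = i + 1 := by omega
                rw [this]
        · intro h k hk1 hk2
          have := h k (by omega) (by omega)
          have he : i + j - k = i + 1 + (j - 1) - k := by omega
          rw [← he]; exact this
      · rw [bne_iff_ne.mpr hne]
        simp only [if_true, Bool.false_eq_true, false_iff]
        intro h
        have := h i (le_refl i) hij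
        have he : i + j - i = j := by omega
        rw [he] at this
        exact hne this
    · simp only [if_neg hij, true_iff]
      intro k hk1 hk2; omega

-- a list equals its reverse iff every position matches its mirror
theorem reverse_eq_iff (s : List Char) :
    s = s.reverse ↔ ∀ k, k < s.length → s.getD k ' ' = s.getD (s.length - 1 - k) ' ' := by
  constructor
  · intro h k hk
    conv_lhs => rw [h]
    rw [List.getD_eq_getElem s.reverse ' ' (by simpa using hk),
        List.getD_eq_getElem s ' ' (by omega)]
    rw [List.getElem_reverse]
  · intro h
    apply List.ext_getElem (by simp)
    intro k hk hk'
    have := h k hk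
    rw [List.getD_eq_getElem s ' ' hk, List.getD_eq_getElem s ' ' (by omega)] at this
    rw [List.getElem_reverse]
    exact this

-- the two-pointer test from (0, len-1) agrees with the reversal test
theorem twoPtr_eq_palindrome (s : List Char) :
    twoPtr s 0 (s.length - 1) = true ↔ s = s.reverse := by
  rw [twoPtr_iff s (s.length - 1) 0 (s.length - 1) (by omega), reverse_eq_iff]
  constructor
  · intro h k hk
    rcases Nat.lt_or_ge k (s.length - 1) with hlt | hge
    · have := h k (Nat.zero_le k) hlt
      have he : 0 + (s.length - 1) - k = s.length - 1 - k := by omega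
      rwa [he] at this
    · -- k = s.length - 1 (since k < length): mirror of k is 0
      have hk' : k = s.length - 1 := by omega
      subst hk'
      have he : s.length - 1 - (s.length - 1) = 0 := by omega
      rw [he]
      rcases Nat.lt_or_ge 0 (s.length - 1) with hpos | hz
      · have := h 0 (le_refl 0) hpos
        have he2 : 0 + (s.length - 1) - 0 = s.length - 1 := by omega
        rw [he2] at this
        exact this.symm
      · have : s.length - 1 = 0 := by omega
        rw [this]
  · intro h k hk1 hk2
    have := h k (by omega)
    have he : 0 + (s.length - 1) - k = s.length - 1 - k := by omega
    rw [he]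
    exact this

-- per-phrase: A's boolean test equals B's boolean test
theorem test_eq (phrase : String) :
    (PySem.Str.replace phrase " " "" ==
      (PySem.Str.slice? (PySem.Str.replace phrase " " "") none none (-1)).getD "") =
    twoPtr (PySem.Str.replace phrase " " "").toList 0
      ((PySem.Str.replace phrase " " "").toList.length - 1) := by
  set t := PySem.Str.replace phrase " " "" with ht
  rw [PySem.Str.slice?_none_none_neg_one t]
  simp only [Option.getD_some]
  rw [Bool.eq_iff_iff, twoPtr_eq_palindrome]
  rw [beq_iff_eq]
  constructor
  · intro h
    conv_lhs => rw [h]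
    simp
  · intro h
    conv_lhs => rw [← String.ofList_toList (s := t), h]

-- ===== VERDICT (by name: the statement is the Claim_ definition above) =====
theorem solve_spec : Claim_equal_solve := by
  intro phrases _
  unfold Spec_solve solve solve_alt
  have hf : (fun (result : List String) (phrase : String) =>
      let phrase_save := PySem.Str.replace phrase " " ""
      let inverse_phrase := (PySem.Str.slice? phrase_save none none (-1)).getD ""
      if phrase_save == inverse_phrase then result ++ [phrase] else result)
    = (fun (result : List String) (phrase : String) =>
      let s := (PySem.Str.replace phrase " " "").toList
      if twoPtr s 0 (s.length - 1) then result ++ [phrase] else result) := by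
    funext result phrase
    simp only [test_eq phrase]
  rw [hf]
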